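-- pv_equiv track=rewrite | github.com/vadushkin/LeetCodeTasks | Python/2500-2600/2511. Maximum Enemy Forts That Can Be Captured/v2.py | solve
-- ===== SOURCE A (Python) =====
-- def solve(arr):
--     max_ = 0
--     count, flag = 0, False
--
--     for num in arr:
--
--         if num == 1:
--             count, flag = 0, True
--         elif num == -1:
--             max_, count, flag = max(max_, count), 0, False
--         else:
--             if flag:
--                 count += 1
--
--     return max_
-- ===== SOURCE B (Python) =====
-- def solve(arr):
--     # two-phase: positions of forts (1) and enemy forts (-1), then adjacent-pair scan
--     nz = [(i, v) for i, v in enumerate(arr) if v in (1, -1)]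
--     best = 0
--     for (i, a), (j, b) in zip(nz, nz[1:]):
--         if a == 1 and b == -1:
--             best = max(best, j - i - 1)
--     return best
-- ===== Notes on version B (the rewrite author's own statement) =====
-- stated objective: alternative
-- what changed: Replaces A's one-pass flag/counter state machine by a two-phase decomposition: first collect (index, value) for every 1/-1 cell, then take the maximum gap j-i-1 over adjacent pairs whose values are 1 then -1.
import Mathlib
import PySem

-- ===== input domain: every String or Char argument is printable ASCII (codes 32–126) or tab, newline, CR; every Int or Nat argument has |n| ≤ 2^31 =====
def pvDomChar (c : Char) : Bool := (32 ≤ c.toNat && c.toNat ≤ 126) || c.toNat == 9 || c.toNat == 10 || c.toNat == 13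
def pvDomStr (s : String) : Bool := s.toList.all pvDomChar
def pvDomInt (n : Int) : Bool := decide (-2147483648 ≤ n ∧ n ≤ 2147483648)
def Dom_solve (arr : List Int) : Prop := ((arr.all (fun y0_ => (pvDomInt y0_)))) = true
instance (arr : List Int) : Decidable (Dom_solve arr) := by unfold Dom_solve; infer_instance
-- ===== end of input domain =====

-- B replaces A's one-pass flag/counter state machine by a two-phase decomposition
-- (collect fort positions, then scan adjacent pairs); same cost, alternative structure.

-- ===== PORT A =====
-- one loop step of A: state (max_, count, flag)
def solveStep (st : Int × Int × Bool) (num : Int) : Int × Int × Bool :=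
  if num = 1 then (st.1, 0, true)
  else if num = -1 then (max st.1 st.2.1, 0, false)
  else if st.2.2 then (st.1, st.2.1 + 1, st.2.2) else st

def solve (arr : List Int) : Int :=
  (arr.foldl solveStep (0, 0, false)).1

-- ===== PORT B =====
-- nz[1:] is ported as List.tail (exact for a list and index 1)
def solve_alt (arr : List Int) : Int :=
  let nz := (PySem.List.enumerate arr).filter (fun p => p.2 == 1 || p.2 == -1)
  (nz.zip nz.tail).foldl
    (fun best pq => if pq.1.2 = 1 ∧ pq.2.2 = -1 then max best (pq.2.1 - pq.1.1 - 1) else best) 0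

-- ===== PRECONDITION & SPEC =====
def Spec_solve (arr : List Int) (out : Int) : Prop := out = solve_alt arr
instance (arr : List Int) (out : Int) : Decidable (Spec_solve arr out) := by unfold Spec_solve; infer_instance

-- ===== CLAIM (what is proved, stated in full; the proofs are below) =====
def Claim_equal_solve : Prop := ∀ (arr : List Int), Dom_solve arr → Spec_solve arr (solve arr)

-- ===== LEMMAS AND PROOFS =====

-- abstract "best gap from here on" of A's loop, with pending count c and flag f
def g (c : Int) (f : Bool) : List Int → Int
  | [] => 0
  | x :: l =>
    if x = 1 then g 0 true l
    else if x = -1 then max c (g 0 false l)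
    else g (if f then c + 1 else c) f l

-- the (index, value) list of fort cells, indices starting at k
def nzFrom (k : Int) : List Int → List (Int × Int)
  | [] => []
  | x :: l => if x = 1 ∨ x = -1 then (k, x) :: nzFrom (k + 1) l else nzFrom (k + 1) l

-- maximum adjacent 1→-1 gap of a fort list
def pm : List (Int × Int) → Int
  | [] => 0
  | [_] => 0
  | p :: q :: r => max (if p.2 = 1 ∧ q.2 = -1 then q.1 - p.1 - 1 else 0) (pm (q :: r))

theorem g_nonneg (l : List Int) : ∀ c f, 0 ≤ g c f l := by
  induction l with
  | nil => intro c f; simp [g]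
  | cons x l ih =>
    intro c f
    simp only [g]
    split
    · exact ih 0 true
    · split
      · exact le_trans (ih 0 false) (le_max_right _ _)
      · exact ih _ f

theorem pm_nonneg (l : List (Int × Int)) : 0 ≤ pm l := by
  induction l with
  | nil => simp [pm]
  | cons p t ih =>
    cases t with
    | nil => simp [pm]
    | cons q r => exact le_trans ih (le_max_right _ _)

theorem pm_cons_ne_one (p : Int × Int) (l : List (Int × Int)) (h : p.2 ≠ 1) :
    pm (p :: l) = pm l := by
  cases l with
  | nil => simp [pm]
  | cons q r =>
    simp only [pm]
    rw [if_neg (by rintro ⟨h1, _⟩; exact h h1)]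
    exact max_eq_right (pm_nonneg _)

-- A's fold computes max of the incoming max_ and the abstract best gap
theorem foldA (l : List Int) : ∀ (m c : Int) (f : Bool), 0 ≤ m → 0 ≤ c →
    (l.foldl solveStep (m, c, f)).1 = max m (g c f l) := by
  induction l with
  | nil => intro m c f hm _; simp [g, max_eq_left hm]
  | cons x l ih =>
    intro m c f hm hc
    simp only [List.foldl_cons, solveStep, g]
    split
    · exact ih m 0 true hm le_rfl
    · split
      · rw [ih (max m c) 0 false (le_trans hm (le_max_left _ _)) le_rfl, max_assoc]
      · cases f with
        | true => simpa using ih m (c + 1) true hm (by omega)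
        | false => simpa using ih m c false hm hc

-- the abstract best gap equals the pairwise maximum over the fort list
theorem key (l : List Int) : ∀ (k : Int),
    (∀ i, g (k - i - 1) true l = pm ((i, 1) :: nzFrom k l)) ∧
    g 0 false l = pm (nzFrom k l) := by
  induction l with
  | nil =>
    intro k
    constructor
    · intro i; simp [g, nzFrom, pm]
    · simp [g, nzFrom, pm]
  | cons x l ih =>
    intro k
    by_cases h1 : x = 1
    · subst h1
      have hk := (ih (k + 1)).1 k
      rw [show k + 1 - k - 1 = (0 : Int) by ring] at hk
      constructor
      · intro i
        simp [g, nzFrom, pm]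
        rw [max_eq_right (pm_nonneg _), hk]
      · simp [g, nzFrom]
        exact hk
    · by_cases h2 : x = -1
      · subst h2
        have hf : g 0 false l = pm (nzFrom (k + 1) l) := (ih (k + 1)).2
        have hskip : pm ((k, (-1 : Int)) :: nzFrom (k + 1) l) = pm (nzFrom (k + 1) l) :=
          pm_cons_ne_one _ _ (by norm_num)
        constructor
        · intro i
          simp [g, nzFrom, pm]
          rw [hskip, ← hf]
        · simp [g, nzFrom]
          rw [max_eq_right (g_nonneg l 0 false), hskip, ← hf]
      · -- x is ground (neither 1 nor -1): skipped by nzFrom, count grows in g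
        constructor
        · intro i
          simp [g, nzFrom, h1, h2]
          rw [show k - i = k + 1 - i - 1 by ring]
          exact (ih (k + 1)).1 i
        · simp [g, nzFrom, h1, h2]
          exact (ih (k + 1)).2

-- B's pairwise fold computes max of the accumulator and pm
theorem foldB (nz : List (Int × Int)) : ∀ (best : Int), 0 ≤ best →
    ((nz.zip nz.tail).foldl
      (fun best pq => if pq.1.2 = 1 ∧ pq.2.2 = -1 then max best (pq.2.1 - pq.1.1 - 1) else best)
      best) = max best (pm nz) := by
  induction nz with
  | nil => intro best hb; simp [pm, max_eq_left hb]
  | cons p t ih =>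
    intro best hb
    cases t with
    | nil => simp [pm, max_eq_left hb]
    | cons q r =>
      simp only [List.tail_cons, List.zip_cons_cons, List.foldl_cons, pm]
      simp only [List.tail_cons] at ih
      by_cases hc : p.2 = 1 ∧ q.2 = -1
      · rw [if_pos hc, if_pos hc,
          ih (max best (q.1 - p.1 - 1)) (le_trans hb (le_max_left _ _)), max_assoc]
      · rw [if_neg hc, if_neg hc, ih best hb,
          max_eq_right (pm_nonneg (q :: r))]

theorem enumFilter (l : List Int) : ∀ (s : Int),
    (PySem.List.enumerate l s).filter (fun p => p.2 == 1 || p.2 == -1) = nzFrom s l := by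
  induction l with
  | nil => intro s; simp [PySem.List.enumerate_nil, nzFrom]
  | cons x l ih =>
    intro s
    rw [PySem.List.enumerate_cons, List.filter_cons, nzFrom]
    by_cases h : x = 1 ∨ x = -1
    · rw [if_pos h, if_pos (by simpa using h), ih]
    · rw [if_neg h, if_neg (by simpa using not_or.mp h), ih]

-- ===== VERDICT (by name: the statement is the Claim_ definition above) =====
theorem solve_spec : Claim_equal_solve := by
  intro arr _
  show solve arr = solve_alt arr
  unfold solve solve_alt
  rw [foldA arr 0 0 false le_rfl le_rfl, max_eq_right (g_nonneg arr 0 false),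
    (key arr 0).2]
  simp only [enumFilter arr 0]
  rw [foldB (nzFrom 0 arr) 0 le_rfl, max_eq_right (pm_nonneg _)]
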